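-- pv_equiv track=rewrite | github.com/guanqiao/python-wiki | src/pywiki/generators/docs/technical_design_spec_generator.py | _extract_design_decisions
-- ===== SOURCE A (Python) =====
-- def _extract_design_decisions(content: str) -> list[dict[str, str]]:
--     """提取设计决策"""
--     decisions = []
--     current_decision = None
--
--     for line in content.split("\n"):
--         if line.startswith("### "):
--             if current_decision:
--                 decisions.append(current_decision)
--             current_decision = {"title": line[4:].strip()}
--         elif current_decision:
--             if line.startswith("**") and "**" in line[2:]:
--                 key = line.split("**")[1].strip(": ")
--                 value = line.split("**")[-1].strip() if len(line.split("**")) > 2 else ""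
--                 current_decision[key.lower()] = value
--
--     if current_decision:
--         decisions.append(current_decision)
--
--     return decisions[:10]
-- ===== SOURCE B (Python) =====
-- def _extract_design_decisions(content: str) -> list[dict[str, str]]:
--     """提取设计决策 (two-phase: group lines into sections, then parse each section)"""
--     # Phase 1: group the lines into (title, body-lines) sections.
--     sections = []
--     for line in content.split("\n"):
--         if line.startswith("### "):
--             sections.append((line[4:].strip(), []))
--         elif sections:
--             sections[-1][1].append(line)
--     # Phase 2: parse each of the (at most) first 10 sections into its dict.
--     result = []
--     for title, body in sections[:10]:
--         decision = {"title": title}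
--         for line in body:
--             if line.startswith("**") and "**" in line[2:]:
--                 parts = line.split("**")
--                 key = parts[1].strip(": ")
--                 value = parts[-1].strip() if len(parts) > 2 else ""
--                 decision[key.lower()] = value
--         result.append(decision)
--     return result
-- ===== Notes on version B (the rewrite author's own statement) =====
-- stated objective: alternative
-- what changed: Replaced A's single pass threading a (decisions, current_decision) state with a two-phase decomposition: first group lines into (title, body) sections, then parse each of the first 10 sections into its dict with the same '**'-split logic.
import Mathlib
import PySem

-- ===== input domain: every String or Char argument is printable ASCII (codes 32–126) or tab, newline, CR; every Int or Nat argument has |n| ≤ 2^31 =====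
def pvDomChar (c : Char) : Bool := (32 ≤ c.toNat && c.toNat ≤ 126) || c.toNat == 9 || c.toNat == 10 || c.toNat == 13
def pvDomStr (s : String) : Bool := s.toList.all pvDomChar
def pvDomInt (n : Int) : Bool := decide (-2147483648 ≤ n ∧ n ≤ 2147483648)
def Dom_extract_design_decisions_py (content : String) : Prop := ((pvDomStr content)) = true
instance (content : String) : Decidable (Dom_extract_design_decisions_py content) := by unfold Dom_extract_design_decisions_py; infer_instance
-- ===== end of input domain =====

-- B replaces A's one-pass (decisions, current) state machine by a group-then-parse two-phase
-- decomposition (same line-parsing rules); objective: alternative, same cost.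

-- ===== PORT A =====
-- shared by both ports: both Pythons contain this identical body-line parsing snippet
-- (the '.getD 1 ""'/'getLast?' defaults are never hit: under the guard the split has ≥ 2 parts)
def pvParseBodyLine (d : PySem.Dict String String) (line : String) : PySem.Dict String String :=
  if PySem.Str.startswith line "**" && PySem.Str.isIn "**" (PySem.Str.slice line (some 2) none) then
    let parts := (PySem.Str.split? line "**").getD []
    let key := PySem.Str.stripChars (parts.getD 1 "") ": "
    let value := if parts.length > 2 then PySem.Str.strip (parts.getLast?.getD "") else ""
    d.insert (PySem.Str.lower key) value
  else d

-- one iteration of A's loop over the lines ('current_decision' is None or a dict that always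
-- contains "title", hence truthy iff some)
def pvStepA (st : List (PySem.Dict String String) × Option (PySem.Dict String String))
    (line : String) : List (PySem.Dict String String) × Option (PySem.Dict String String) :=
  if PySem.Str.startswith line "### " then
    ((match st.2 with | some d => st.1 ++ [d] | none => st.1),
     some ((PySem.Dict.empty).insert "title" (PySem.Str.strip (PySem.Str.slice line (some 4) none))))
  else
    match st.2 with
    | none => st
    | some d => (st.1, some (pvParseBodyLine d line))

def extract_design_decisions_py (content : String) : List (List (String × String)) :=
  let st := (((PySem.Str.split? content "\n").getD [])).foldl pvStepA ([], none)
  let decisions := match st.2 with | some d => st.1 ++ [d] | none => st.1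
  -- decisions[:10] with a nonnegative literal bound is take 10
  (decisions.take 10).map (fun d => d.items)

-- ===== PORT B =====
-- sections[-1][1].append(line): append to the body of the last section (no-op on [], = 'elif sections')
def pvAppendLast (secs : List (String × List String)) (line : String) : List (String × List String) :=
  match secs with
  | [] => []
  | [(t, b)] => [(t, b ++ [line])]
  | s :: rest => s :: pvAppendLast rest line

-- one iteration of B's phase-1 grouping loop
def pvStepB (secs : List (String × List String)) (line : String) : List (String × List String) :=
  if PySem.Str.startswith line "### " then
    secs ++ [(PySem.Str.strip (PySem.Str.slice line (some 4) none), ([] : List String))]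
  else pvAppendLast secs line

def extract_design_decisions_py_alt (content : String) : List (List (String × String)) :=
  let sections := (((PySem.Str.split? content "\n").getD [])).foldl pvStepB []
  (sections.take 10).map (fun sec =>
    (sec.2.foldl pvParseBodyLine ((PySem.Dict.empty).insert "title" sec.1)).items)

-- ===== PRECONDITION & SPEC =====
def Spec_extract_design_decisions_py (content : String) (out : List (List (String × String))) : Prop := out = extract_design_decisions_py_alt content
instance (content : String) (out : List (List (String × String))) : Decidable (Spec_extract_design_decisions_py content out) := by unfold Spec_extract_design_decisions_py; infer_instance

-- ===== CLAIM (what is proved, stated in full; the proofs are below) =====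
def Claim_equal_extract_design_decisions_py : Prop := ∀ (content : String), Dom_extract_design_decisions_py content → Spec_extract_design_decisions_py content (extract_design_decisions_py content)

-- ===== LEMMAS AND PROOFS =====

-- the dict a section (title, body) parses to
def pvParseSec (sec : String × List String) : PySem.Dict String String :=
  sec.2.foldl pvParseBodyLine ((PySem.Dict.empty).insert "title" sec.1)

-- A's closing step: the dict list plus the open decision, if any
def pvFinish (st : List (PySem.Dict String String) × Option (PySem.Dict String String)) :
    List (PySem.Dict String String) :=
  match st.2 with | some d => st.1 ++ [d] | none => st.1

theorem pvAppendLast_append (rest secs : List (String × List String)) (line : String)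
    (h : secs ≠ []) : pvAppendLast (rest ++ secs) line = rest ++ pvAppendLast secs line := by
  induction rest with
  | nil => simp
  | cons s rs ih =>
    cases rs with
    | nil =>
      cases secs with
      | nil => exact absurd rfl h
      | cons a as => cases s; simp [pvAppendLast]
    | cons s' rs' => simpa [pvAppendLast] using ih

theorem pvStepB_append (rest secs : List (String × List String)) (line : String)
    (h : secs ≠ []) : pvStepB (rest ++ secs) line = rest ++ pvStepB secs line := by
  unfold pvStepB
  split
  · simp
  · exact pvAppendLast_append rest secs line h

theorem pvStepB_ne_nil (secs : List (String × List String)) (line : String)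
    (h : secs ≠ []) : pvStepB secs line ≠ [] := by
  unfold pvStepB
  split
  · simp
  · cases secs with
    | nil => exact absurd rfl h
    | cons s rs =>
      cases rs with
      | nil => cases s; simp [pvAppendLast]
      | cons s' rs' => simp [pvAppendLast]

theorem pvFoldB_append (ls : List String) (rest secs : List (String × List String))
    (h : secs ≠ []) :
    ls.foldl pvStepB (rest ++ secs) = rest ++ ls.foldl pvStepB secs := by
  induction ls generalizing secs with
  | nil => simp
  | cons line ls ih =>
    simp only [List.foldl_cons]
    rw [pvStepB_append rest secs line h]
    exact ih _ (pvStepB_ne_nil secs line h)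

theorem pvFoldA_shift (ls : List String) (d1 d2 : List (PySem.Dict String String))
    (cur : Option (PySem.Dict String String)) :
    ls.foldl pvStepA (d1 ++ d2, cur)
      = (d1 ++ (ls.foldl pvStepA (d2, cur)).1, (ls.foldl pvStepA (d2, cur)).2) := by
  induction ls generalizing d2 cur with
  | nil => simp
  | cons line ls ih =>
    simp only [List.foldl_cons]
    have hstep : pvStepA (d1 ++ d2, cur) line
        = (d1 ++ (pvStepA (d2, cur) line).1, (pvStepA (d2, cur) line).2) := by
      unfold pvStepA
      cases cur <;> split <;> simp
    rw [hstep]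
    have := ih (pvStepA (d2, cur) line).1 (pvStepA (d2, cur) line).2
    simpa using this

theorem pvFinish_shift (d1 l : List (PySem.Dict String String))
    (c : Option (PySem.Dict String String)) :
    pvFinish (d1 ++ l, c) = d1 ++ pvFinish (l, c) := by
  unfold pvFinish; cases c <;> simp

-- main invariant: one open section, deferred parsing agrees with incremental parsing
theorem pvMain (ls : List String) (t : String) (body : List String) :
    pvFinish (ls.foldl pvStepA ([], some (pvParseSec (t, body))))
      = (ls.foldl pvStepB [(t, body)]).map pvParseSec := by
  induction ls generalizing t body with
  | nil => simp [pvFinish]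
  | cons line ls ih =>
    simp only [List.foldl_cons]
    by_cases hh : PySem.Str.startswith line "### " = true
    · have hA : pvStepA ([], some (pvParseSec (t, body))) line
          = ([pvParseSec (t, body)],
             some (pvParseSec (PySem.Str.strip (PySem.Str.slice line (some 4) none), []))) := by
        unfold pvStepA
        rw [if_pos hh]
        simp [pvParseSec]
      have hB : pvStepB [(t, body)] line
          = [(t, body)] ++ [(PySem.Str.strip (PySem.Str.slice line (some 4) none), ([] : List String))] := by
        unfold pvStepB
        rw [if_pos hh]
      rw [hA, hB, pvFoldB_append _ _ _ (by simp)]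
      have h1 : ([pvParseSec (t, body)] : List (PySem.Dict String String))
          = [pvParseSec (t, body)] ++ [] := by simp
      rw [h1, pvFoldA_shift, pvFinish_shift]
      simp [ih]
    · have hA : pvStepA ([], some (pvParseSec (t, body))) line
          = ([], some (pvParseSec (t, body ++ [line]))) := by
        unfold pvStepA
        rw [if_neg hh]
        simp [pvParseSec, List.foldl_append]
      have hB : pvStepB [(t, body)] line = [(t, body ++ [line])] := by
        unfold pvStepB
        rw [if_neg hh]
        simp [pvAppendLast]
      rw [hA, hB, ih]

theorem pvTop (ls : List String) :
    pvFinish (ls.foldl pvStepA ([], none)) = (ls.foldl pvStepB []).map pvParseSec := by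
  induction ls with
  | cons line ls ih =>
    simp only [List.foldl_cons]
    by_cases hh : PySem.Str.startswith line "### " = true
    · have hA : pvStepA ([], none) line
          = ([], some (pvParseSec (PySem.Str.strip (PySem.Str.slice line (some 4) none), []))) := by
        unfold pvStepA
        rw [if_pos hh]
        simp [pvParseSec]
      have hB : pvStepB ([] : List (String × List String)) line
          = [(PySem.Str.strip (PySem.Str.slice line (some 4) none), ([] : List String))] := by
        unfold pvStepB
        rw [if_pos hh]
        simp
      rw [hA, hB]
      exact pvMain ls _ []
    · have hA : pvStepA ([], none) line = ([], none) := by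
        unfold pvStepA
        rw [if_neg hh]
      have hB : pvStepB ([] : List (String × List String)) line = [] := by
        unfold pvStepB
        rw [if_neg hh]
        simp [pvAppendLast]
      rw [hA, hB, ih]
  | nil => simp [pvFinish]

-- ===== VERDICT (by name: the statement is the Claim_ definition above) =====
theorem extract_design_decisions_py_spec : Claim_equal_extract_design_decisions_py := by
  intro content _
  unfold Spec_extract_design_decisions_py
  have h := pvTop ((PySem.Str.split? content "\n").getD [])
  simp only [pvFinish] at h
  simp only [extract_design_decisions_py, extract_design_decisions_py_alt]
  rw [h]
  simp only [List.map_take, List.map_map]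
  rfl
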